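-- pv_equiv track=rewrite | github.com/ilgrisha/CornStructor | backend/app/services/secondary_structure_service.py | _runs_from_flags
-- ===== SOURCE A (Python) =====
-- from typing import List, Tuple
--
-- def _runs_from_flags(flags: List[bool]) -> List[Tuple[int, int]]:
--     """
--     Extract consecutive True runs from a boolean list as [start, end) intervals.
--
--     Args:
--         flags: list of booleans
--
--     Returns:
--         List of (start, end) tuples (0-based, end-exclusive).
--     """
--     runs: List[Tuple[int, int]] = []
--     n = len(flags)
--     i = 0
--     while i < n:
--         if flags[i]:
--             j = i + 1
--             while j < n and flags[j]:
--                 j += 1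
--             runs.append((i, j))
--             i = j
--         else:
--             i += 1
--     return runs
-- ===== SOURCE B (Python) =====
-- from typing import List, Tuple
--
-- def _runs_from_flags(flags: List[bool]) -> List[Tuple[int, int]]:
--     """Single flat pass with edge detection: record start on a rising edge,
--     emit (start, i) on a falling edge, close the last run at len(flags)."""
--     runs: List[Tuple[int, int]] = []
--     start = 0
--     prev = False
--     for i, f in enumerate(flags):
--         if f and not prev:
--             start = i
--         elif prev and not f:
--             runs.append((start, i))
--         prev = f
--     if prev:
--         runs.append((start, len(flags)))
--     return runs
-- ===== Notes on version B (the rewrite author's own statement) =====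
-- stated objective: simpler
-- what changed: Replaced A's nested while-loops (outer cursor plus inner scan that jumps across each True run) by a single flat edge-detection pass: record the start on a False->True transition, emit (start, i) on a True->False transition, and close the final run at len(flags).
import Mathlib
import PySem

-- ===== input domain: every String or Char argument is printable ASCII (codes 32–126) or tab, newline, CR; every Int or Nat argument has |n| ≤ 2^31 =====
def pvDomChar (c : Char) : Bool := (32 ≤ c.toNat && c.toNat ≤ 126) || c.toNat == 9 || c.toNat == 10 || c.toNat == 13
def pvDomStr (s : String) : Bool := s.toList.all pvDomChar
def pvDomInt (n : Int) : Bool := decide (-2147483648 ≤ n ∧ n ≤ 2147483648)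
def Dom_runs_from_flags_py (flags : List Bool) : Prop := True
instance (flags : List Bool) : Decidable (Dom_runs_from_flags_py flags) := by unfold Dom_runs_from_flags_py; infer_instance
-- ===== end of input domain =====

-- B replaces A's nested while-loops (inner scan to the end of each run) by one flat
-- edge-detection pass keeping only a current-start marker; objective: simpler decomposition.

-- ===== PORT A =====
-- inner 'while j < n and flags[j]: j += 1' loop
def pvInnerJ (flags : List Bool) (j : Nat) : Nat :=
  if j < flags.length ∧ flags.getD j false then pvInnerJ flags (j + 1) else j
termination_by flags.length - j
decreasing_by omega

theorem pvInnerJ_ge (flags : List Bool) (j : Nat) : j ≤ pvInnerJ flags j := by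
  unfold pvInnerJ
  split
  · have := pvInnerJ_ge flags (j + 1); omega
  · exact Nat.le_refl j
termination_by flags.length - j
decreasing_by omega

-- outer 'while i < n' loop
def pvOuter (flags : List Bool) (i : Nat) : List (Int × Int) :=
  if i < flags.length then
    if flags.getD i false then
      let j := pvInnerJ flags (i + 1)
      ((i : Int), (j : Int)) :: pvOuter flags j
    else pvOuter flags (i + 1)
  else []
termination_by flags.length - i
decreasing_by
  · have := pvInnerJ_ge flags (i + 1); omega
  · omega

def runs_from_flags_py (flags : List Bool) : List (Int × Int) := pvOuter flags 0

-- ===== PORT B =====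
-- one fold step of the edge-detection pass (state: runs, current start, previous flag)
def pvStep (st : List (Int × Int) × Int × Bool) (p : Int × Bool) :
    List (Int × Int) × Int × Bool :=
  if p.2 && !st.2.2 then (st.1, p.1, p.2)
  else if st.2.2 && !p.2 then (st.1 ++ [(st.2.1, p.1)], st.2.1, p.2)
  else (st.1, st.2.1, p.2)

-- 'if prev: runs.append((start, len(flags)))' after the loop
def pvFinish (n : Nat) (st : List (Int × Int) × Int × Bool) : List (Int × Int) :=
  if st.2.2 then st.1 ++ [(st.2.1, (n : Int))] else st.1

def runs_from_flags_py_alt (flags : List Bool) : List (Int × Int) :=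
  pvFinish flags.length ((PySem.List.enumerate flags 0).foldl pvStep ([], 0, false))

-- ===== PRECONDITION & SPEC =====
def Spec_runs_from_flags_py (flags : List Bool) (out : List (Int × Int)) : Prop := out = runs_from_flags_py_alt flags
instance (flags : List Bool) (out : List (Int × Int)) : Decidable (Spec_runs_from_flags_py flags out) := by unfold Spec_runs_from_flags_py; infer_instance

-- ===== CLAIM (what is proved, stated in full; the proofs are below) =====
def Claim_equal_runs_from_flags_py : Prop := ∀ (flags : List Bool), Dom_runs_from_flags_py flags → Spec_runs_from_flags_py flags (runs_from_flags_py flags)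

-- ===== LEMMAS AND PROOFS =====

-- (length of the leading True run, rest of the list starting at the first False)
def pvSplitRun : List Bool → Nat × List Bool
  | [] => (0, [])
  | true :: t => ((pvSplitRun t).1 + 1, (pvSplitRun t).2)
  | false :: t => (0, false :: t)

theorem pvSplitRun_len : ∀ t : List Bool, (pvSplitRun t).2.length ≤ t.length
  | [] => Nat.le_refl _
  | true :: t => le_trans (pvSplitRun_len t) (Nat.le_succ _)
  | false :: _ => Nat.le_refl _

theorem pvSplitRun_drop : ∀ t : List Bool, (pvSplitRun t).2 = t.drop (pvSplitRun t).1
  | [] => rfl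
  | true :: t => pvSplitRun_drop t
  | false :: _ => rfl

-- common reference: the runs of t, with t starting at absolute index i
def pvRunsAux : List Bool → Nat → List (Int × Int)
  | [], _ => []
  | false :: t, i => pvRunsAux t (i + 1)
  | true :: t, i =>
      ((i : Int), ((i + 1 + (pvSplitRun t).1 : Nat) : Int)) ::
        pvRunsAux (pvSplitRun t).2 (i + 1 + (pvSplitRun t).1)
termination_by t _ => t.length
decreasing_by
  · simp
  · have := pvSplitRun_len t; simp; omega

theorem pvInnerJ_spec (flags : List Bool) (j : Nat) :
    pvInnerJ flags j = j + (pvSplitRun (flags.drop j)).1 := by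
  unfold pvInnerJ
  by_cases h : j < flags.length
  · have hd : flags.drop j = flags[j] :: flags.drop (j + 1) := List.drop_eq_getElem_cons h
    have hg : flags.getD j false = flags[j] := List.getD_eq_getElem flags false h
    by_cases hb : flags[j] = true
    · rw [if_pos ⟨h, by rw [hg, hb]⟩, pvInnerJ_spec flags (j + 1), hd, hb]
      simp [pvSplitRun]; omega
    · have hbf : flags[j] = false := by simpa using hb
      rw [if_neg (by simp [List.getElem?_eq_getElem h, hbf]), hd, hbf]
      simp [pvSplitRun]
  · rw [if_neg (by omega)]
    rw [List.drop_eq_nil_of_le (by omega)]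
    simp [pvSplitRun]
termination_by flags.length - j
decreasing_by omega

theorem pvOuter_eq (flags : List Bool) (i : Nat) :
    pvOuter flags i = pvRunsAux (flags.drop i) i := by
  unfold pvOuter
  by_cases h : i < flags.length
  · have hd : flags.drop i = flags[i] :: flags.drop (i + 1) := List.drop_eq_getElem_cons h
    have hg : flags.getD i false = flags[i] := List.getD_eq_getElem flags false h
    by_cases hb : flags[i] = true
    · rw [if_pos h, if_pos (by rw [hg, hb]), hd, hb]
      have hj : pvInnerJ flags (i + 1) = i + 1 + (pvSplitRun (flags.drop (i + 1))).1 :=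
        pvInnerJ_spec flags (i + 1)
      have hrec := pvOuter_eq flags (pvInnerJ flags (i + 1))
      rw [hj] at hrec
      simp only [pvRunsAux, hj, hrec]
      congr 1
      rw [pvSplitRun_drop, List.drop_drop]
    · have hbf : flags[i] = false := by simpa using hb
      rw [if_pos h, if_neg (by rw [hg, hbf]; simp), hd, hbf]
      rw [pvOuter_eq flags (i + 1)]
      simp [pvRunsAux]
  · rw [if_neg h, List.drop_eq_nil_of_le (by omega)]
    simp [pvRunsAux]
termination_by flags.length - i
decreasing_by
  · have := pvInnerJ_ge flags (i + 1); omega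
  · omega

theorem pvFold_eq (t : List Bool) : ∀ (i : Nat) (runs : List (Int × Int)) (s : Int) (prev : Bool),
    pvFinish (i + t.length) ((PySem.List.enumerate t (i : Int)).foldl pvStep (runs, s, prev))
      = if prev then
          runs ++ ((s, ((i + (pvSplitRun t).1 : Nat) : Int)) ::
                   pvRunsAux (pvSplitRun t).2 (i + (pvSplitRun t).1))
        else runs ++ pvRunsAux t i := by
  induction t with
  | nil =>
    intro i runs s prev
    cases prev <;> simp [pvFinish, pvSplitRun, pvRunsAux, PySem.List.enumerate]
  | cons b t ih =>
    intro i runs s prev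
    have hcast : (i : Int) + 1 = ((i + 1 : Nat) : Int) := by push_cast; ring
    rw [PySem.List.enumerate_cons]
    cases b <;> cases prev <;> simp only [List.foldl_cons]
    · -- b = false, prev = false
      have hstep : pvStep (runs, s, false) ((i : Int), false) = (runs, s, false) := by
        simp [pvStep]
      have hlen : i + (List.length (false :: t)) = (i + 1) + t.length := by simp; omega
      rw [hstep, hlen, hcast, ih (i + 1) runs s false]
      simp [pvRunsAux]
    · -- b = false, prev = true : falling edge
      have hstep : pvStep (runs, s, true) ((i : Int), false)
          = (runs ++ [(s, (i : Int))], s, false) := by simp [pvStep]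
      have hlen : i + (List.length (false :: t)) = (i + 1) + t.length := by simp; omega
      rw [hstep, hlen, hcast, ih (i + 1) (runs ++ [(s, (i : Int))]) s false]
      simp [pvSplitRun, pvRunsAux, List.append_assoc]
    · -- b = true, prev = false : rising edge
      have hstep : pvStep (runs, s, false) ((i : Int), true) = (runs, (i : Int), true) := by
        simp [pvStep]
      have hlen : i + (List.length (true :: t)) = (i + 1) + t.length := by simp; omega
      rw [hstep, hlen, hcast, ih (i + 1) runs (i : Int) true]
      simp [pvRunsAux]
    · -- b = true, prev = true : run continues
      have hstep : pvStep (runs, s, true) ((i : Int), true) = (runs, s, true) := by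
        simp [pvStep]
      have hlen : i + (List.length (true :: t)) = (i + 1) + t.length := by simp; omega
      rw [hstep, hlen, hcast, ih (i + 1) runs s true]
      simp only [pvSplitRun]
      rw [show i + ((pvSplitRun t).1 + 1) = i + 1 + (pvSplitRun t).1 by omega]
      simp

-- ===== VERDICT (by name: the statement is the Claim_ definition above) =====
theorem runs_from_flags_py_spec : Claim_equal_runs_from_flags_py := by
  intro flags _
  unfold Spec_runs_from_flags_py runs_from_flags_py runs_from_flags_py_alt
  rw [pvOuter_eq]
  have h := pvFold_eq flags 0 [] 0 false
  simp only [Nat.zero_add, Nat.cast_zero, if_neg Bool.false_ne_true, List.nil_append] at h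
  exact h.symm
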